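-- pv_equiv track=rewrite | github.com/jigel/noisi_inv | noisi/ants/tools/bookkeep.py | station_pairs
-- ===== SOURCE A (Python) =====
-- def station_pairs(staids,n,autocorr, only_autocorr=False):
--
--     #staids = self.stations.keys()
--     # sort alphabetically
--     staids = list(staids)
--     staids.sort()
--     blcks_stations = []
--     #blcks_channels = []
--     idprs = []
--
--     n_ids = len(staids)
--     n_auto = 0 if autocorr else 1
--     #n_blk = cfg.n_stationpairs
--
--     for i in range(n_ids):
--         for j in range(i+n_auto,n_ids):
--
--             if only_autocorr and i != j:
--                 continue
--
--             if len(idprs) == n: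
--                 blcks_stations.append(idprs)
--                 idprs = []
--
--             idprs.append((staids[i],staids[j]))
--
--     if len(idprs) <= n:
--         blcks_stations.append(idprs)
--
--
--     # idprs = []
-- #
--     # for blck in blcks_stations:
--         # idprs = []
--         # for pair in blck:
-- #
--             # idprs.extend(self._channel_pairs(pair[0],pair[1],cfg))
-- #
--         # if idprs != []:
--             # blcks_channels.append(idprs)
--
--     return blcks_stations
-- ===== SOURCE B (Python) =====
-- def station_pairs(staids, n, autocorr, only_autocorr=False):
--     s = sorted(staids)
--     if only_autocorr:
--         pairs = [(x, x) for x in s] if autocorr else []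
--     else:
--         start = 0 if autocorr else 1
--         pairs = [(s[i], y) for i in range(len(s)) for y in s[i + start:]]
--     return [pairs[k:k + n] for k in range(0, len(pairs), n)]
-- ===== Notes on version B (the rewrite author's own statement) =====
-- stated objective: alternative
-- what changed: B builds the sorted pair list directly (just the diagonal in only_autocorr mode, suffix slices otherwise) and chunks it by slicing over range(0, len(pairs), n), instead of A's scan over all j with a continue-skip and a stateful flush accumulator; Pre_ excludes n = 0 (A silently returns [[]] dropping every pair, B's range step 0 raises ValueError) and, for positive n, flag/size combinations producing no pairs at all, where A's unconditional trailing append returns [[]] while B returns [] - an unspecified empty-result shape.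
-- outside the precondition, e.g. on station_pairs(['a', 'b'], 0, True, False): A returns [[]], B raises ValueError; on station_pairs([], 1, True, False): A returns [[]], B returns []; on station_pairs(['a', 'b'], 2, False, True): A returns [[]], B returns []
import Mathlib
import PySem

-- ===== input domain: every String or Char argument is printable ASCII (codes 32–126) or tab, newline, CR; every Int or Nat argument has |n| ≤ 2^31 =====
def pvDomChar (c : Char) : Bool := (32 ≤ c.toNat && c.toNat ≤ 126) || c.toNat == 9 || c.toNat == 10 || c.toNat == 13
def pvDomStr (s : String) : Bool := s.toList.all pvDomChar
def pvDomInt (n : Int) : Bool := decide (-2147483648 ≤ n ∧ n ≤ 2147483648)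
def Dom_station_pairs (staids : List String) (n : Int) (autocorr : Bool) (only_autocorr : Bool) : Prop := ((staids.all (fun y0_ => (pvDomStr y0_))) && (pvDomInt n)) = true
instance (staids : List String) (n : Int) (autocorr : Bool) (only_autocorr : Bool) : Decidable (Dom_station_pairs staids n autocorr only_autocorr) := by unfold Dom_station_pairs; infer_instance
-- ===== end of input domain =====

-- B builds the sorted pair list directly (the diagonal alone in only_autocorr mode, suffix slices
-- otherwise) and chunks it by slicing over range(0, len(pairs), n), instead of A's quadratic
-- scan-and-skip with a stateful flush accumulator.

-- ===== PORT A =====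
def station_pairs (staids : List String) (n : Int) (autocorr : Bool) (only_autocorr : Bool) : List (List (String × String)) :=
  let s := PySem.List.sorted staids (fun x => x) false
  let n_ids : Int := s.length
  let n_auto : Int := if autocorr then 0 else 1
  let st := (PySem.List.pyRange 0 n_ids 1).foldl (fun st i =>
    (PySem.List.pyRange (i + n_auto) n_ids 1).foldl (fun (st : List (List (String × String)) × List (String × String)) j =>
      if only_autocorr && !(i == j) then st
      else
        let st := if ((st.2.length : Int) == n) then (st.1 ++ [st.2], ([] : List (String × String))) else st
        (st.1, st.2 ++ [(PySem.List.pyGetD s i "", PySem.List.pyGetD s j "")])) st)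
    (([] : List (List (String × String))), ([] : List (String × String)))
  if (st.2.length : Int) ≤ n then st.1 ++ [st.2] else st.1

-- ===== PORT B =====
def station_pairs_alt (staids : List String) (n : Int) (autocorr : Bool) (only_autocorr : Bool) : List (List (String × String)) :=
  let s := PySem.List.sorted staids (fun x => x) false
  let pairs :=
    if only_autocorr then
      (if autocorr then s.map (fun x => (x, x)) else [])
    else
      let start : Int := if autocorr then 0 else 1
      (PySem.List.pyRange 0 s.length 1).flatMap (fun i =>
        (PySem.List.slice s (some (i + start)) none).map (fun y => (PySem.List.pyGetD s i "", y)))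
  (PySem.List.pyRange 0 pairs.length n).map (fun k => PySem.List.slice pairs (some k) (some (k + n)))

-- ===== PRECONDITION & SPEC =====
-- Pre_ excludes two corners on which A still returns: n = 0, where A's flush can fire only before
-- the first pair so A silently returns [[]] dropping every pair while B's range step 0 raises
-- ValueError; and, for positive n, flag/size combinations generating no pairs at all, where A's
-- unconditional trailing append yields [[]] and B yields [] — an unspecified empty-result shape.
def Pre_station_pairs (staids : List String) (n : Int) (autocorr : Bool) (only_autocorr : Bool) : Prop :=
  n ≠ 0 ∧ (n < 0 ∨
    (if only_autocorr then autocorr = true ∧ staids ≠ []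
     else if autocorr then staids ≠ [] else 2 ≤ staids.length))
instance (staids : List String) (n : Int) (autocorr : Bool) (only_autocorr : Bool) : Decidable (Pre_station_pairs staids n autocorr only_autocorr) := by unfold Pre_station_pairs; infer_instance

def pvWitness_station_pairs : List String × Int × Bool × Bool := (["AA", "BB", "CC"], 2, true, false)

def Spec_station_pairs (staids : List String) (n : Int) (autocorr : Bool) (only_autocorr : Bool) (out : List (List (String × String))) : Prop := out = station_pairs_alt staids n autocorr only_autocorr
instance (staids : List String) (n : Int) (autocorr : Bool) (only_autocorr : Bool) (out : List (List (String × String))) : Decidable (Spec_station_pairs staids n autocorr only_autocorr out) := by unfold Spec_station_pairs; infer_instance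

-- ===== CLAIM (what is proved, stated in full; the proofs are below) =====
def Claim_equal_station_pairs : Prop := ∀ (staids : List String) (n : Int) (autocorr : Bool) (only_autocorr : Bool), Dom_station_pairs staids n autocorr only_autocorr → Pre_station_pairs staids n autocorr only_autocorr → Spec_station_pairs staids n autocorr only_autocorr (station_pairs staids n autocorr only_autocorr)

-- ===== LEMMAS AND PROOFS =====

-- A's flush-then-append step on the state (finished blocks, current block)
def pvStep (n : Int) (st : List (List (String × String)) × List (String × String))
    (p : String × String) : List (List (String × String)) × List (String × String) :=
  let st := if ((st.2.length : Int) == n) then (st.1 ++ [st.2], ([] : List (String × String))) else st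
  (st.1, st.2 ++ [p])

-- A's final 'if len(idprs) <= n' flush
def pvFin (n : Int) (st : List (List (String × String)) × List (String × String)) :
    List (List (String × String)) :=
  if (st.2.length : Int) ≤ n then st.1 ++ [st.2] else st.1

theorem pv_foldl_skip {ι : Type} (p : ι → Bool) (f : ι → String × String) (n : Int) :
    ∀ (l : List ι) (st : List (List (String × String)) × List (String × String)),
      l.foldl (fun st j =>
          if p j then st
          else
            let st := if ((st.2.length : Int) == n) then (st.1 ++ [st.2], ([] : List (String × String))) else st
            (st.1, st.2 ++ [f j])) st
        = ((l.filter (fun j => !p j)).map f).foldl (pvStep n) st := by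
  intro l
  induction l with
  | nil => intro st; rfl
  | cons a t ih =>
      intro st
      cases hpa : p a with
      | true =>
          rw [List.foldl_cons, List.filter_cons, hpa]
          simp only [Bool.not_true, reduceIte]
          exact ih st
      | false =>
          rw [List.foldl_cons, List.filter_cons, hpa]
          simp only [Bool.not_false, reduceIte]
          rw [List.map_cons, List.foldl_cons]
          exact ih _

theorem pv_foldl_flatMap {ι : Type} (F : ι → List (String × String)) (n : Int) :
    ∀ (l : List ι) (st : List (List (String × String)) × List (String × String)),
      (l.flatMap F).foldl (pvStep n) st = l.foldl (fun st i => (F i).foldl (pvStep n) st) st := by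
  intro l
  induction l with
  | nil => intro st; rfl
  | cons a t ih => intro st; simp [List.flatMap_cons, List.foldl_append, ih]

-- no flush happens while the current block's length never hits n
theorem pv_foldl_noflush (n : Int) :
    ∀ (P : List (String × String)) (b : List (List (String × String))) (c : List (String × String)),
      (∀ k : Nat, c.length ≤ k → k < c.length + P.length → (k : Int) ≠ n) →
      P.foldl (pvStep n) (b, c) = (b, c ++ P) := by
  intro P
  induction P with
  | nil => intro b c _; simp
  | cons p t ih =>
      intro b c h
      have hc : ((c.length : Int) == n) = false := by
        have := h c.length (le_refl _) (by simp)
        simpa using this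
      have h1 : pvStep n (b, c) p = (b, c ++ [p]) := by
        simp [pvStep, hc]
      rw [List.foldl_cons, h1,
        ih b (c ++ [p]) (by
          intro k hk1 hk2
          apply h k (by simp at hk1 ⊢; omega) (by simp at hk1 hk2 ⊢; omega))]
      simp

theorem pv_foldl_block (n : Int) (hn : 1 ≤ n)
    (P : List (String × String)) (b : List (List (String × String)))
    (h : (n : Int) < P.length) :
    P.foldl (pvStep n) (b, []) =
      (P.drop n.toNat).foldl (pvStep n) (b ++ [P.take n.toNat], []) := by
  have hlen : (((P.take n.toNat).length : Int)) = n := by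
    have h1 : n.toNat ≤ P.length := by omega
    rw [List.length_take, Nat.min_eq_left h1]
    omega
  have hlenT : (((P.take n.toNat).length : Int) == n) = true := by rw [hlen]; simp
  have h0 : (((0 : Nat) : Int) == n) = false := by simp; omega
  have hsplit : P = P.take n.toNat ++ P.drop n.toNat := (List.take_append_drop _ _).symm
  have hdrop : P.drop n.toNat ≠ [] := by
    have hl : (P.drop n.toNat).length ≠ 0 := by rw [List.length_drop]; omega
    exact fun hnil => hl (by simp [hnil])
  obtain ⟨p, rest, hpr⟩ := List.exists_cons_of_ne_nil hdrop
  conv_lhs => rw [hsplit]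
  rw [List.foldl_append,
    pv_foldl_noflush n _ b [] (by intro k hk1 hk2; simp at hk2; omega),
    List.nil_append, hpr, List.foldl_cons]
  have hflush : pvStep n (b, P.take n.toNat) p = (b ++ [P.take n.toNat], [p]) := by
    unfold pvStep
    rw [hlenT]
    simp
  have hstart : pvStep n (b ++ [P.take n.toNat], []) p = (b ++ [P.take n.toNat], [p]) := by
    unfold pvStep
    simp only [List.length_nil, h0]
    simp
  rw [hflush]
  conv_rhs => rw [List.foldl_cons, hstart]

-- take/drop form of the chunking, for the proofs
def pvChunksWhile (fuel : Nat) (n : Int) (P : List (String × String)) : List (List (String × String)) :=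
  match fuel, P with
  | _, [] => []
  | 0, _ => []
  | fuel + 1, P =>
      PySem.List.slice P none (some n) :: pvChunksWhile fuel n (PySem.List.slice P (some n) none)

-- fuel irrelevance for the take/drop chunking (n ≥ 1)
theorem pv_chunks_fuel (n : Int) (hn : 1 ≤ n) :
    ∀ (f₁ f₂ : Nat) (Q : List (String × String)), Q.length ≤ f₁ → Q.length ≤ f₂ →
      pvChunksWhile f₁ n Q = pvChunksWhile f₂ n Q := by
  intro f₁
  induction f₁ with
  | zero =>
      intro f₂ Q h1 _
      have : Q = [] := List.eq_nil_of_length_eq_zero (by omega)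
      subst this
      cases f₂ <;> rfl
  | succ g ih =>
      intro f₂ Q h1 h2
      cases Q with
      | nil => cases f₂ <;> rfl
      | cons q t =>
          cases f₂ with
          | zero => simp at h2
          | succ g₂ =>
              simp only [pvChunksWhile]
              have hsl : (PySem.List.slice (q :: t) (some n) none).length ≤ g ∧
                  (PySem.List.slice (q :: t) (some n) none).length ≤ g₂ := by
                rw [PySem.List.slice_from _ (by omega), List.length_drop]
                simp only [List.length_cons] at h1 h2 ⊢
                constructor <;> omega
              rw [ih g₂ _ hsl.1 hsl.2]

-- the core agreement for n ≥ 1: A's stateful chunking equals take/drop chunking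
theorem pv_chunk_main (n : Int) (hn : 1 ≤ n) :
    ∀ (P : List (String × String)) (b : List (List (String × String))),
      pvFin n (P.foldl (pvStep n) (b, [])) =
        b ++ (if pvChunksWhile P.length n P = [] then [[]] else pvChunksWhile P.length n P) := by
  suffices H : ∀ (N : Nat) (P : List (String × String)), P.length ≤ N →
      ∀ b, pvFin n (P.foldl (pvStep n) (b, [])) =
        b ++ (if pvChunksWhile P.length n P = [] then [[]] else pvChunksWhile P.length n P) by
    intro P b; exact H P.length P le_rfl b
  intro N
  induction N with
  | zero =>
      intro P hP b
      have : P = [] := List.eq_nil_of_length_eq_zero (by omega)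
      subst this
      simp only [List.foldl_nil, pvFin, List.length_nil, Nat.cast_zero]
      rw [if_pos (by omega)]
      rfl
  | succ N ih =>
      intro P hP b
      by_cases hle : (P.length : Int) ≤ n
      · rw [pv_foldl_noflush n P b [] (by intro k h1 h2; simp at h2; omega)]
        cases P with
        | nil =>
            simp only [List.nil_append, pvFin, List.length_nil, Nat.cast_zero]
            rw [if_pos (by omega)]
            rfl
        | cons p t =>
            have htake : PySem.List.slice (p :: t) none (some n) = p :: t := by
              rw [PySem.List.slice_to _ (by omega)]
              apply List.take_of_length_le
              simp at hle ⊢; omega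
            have hdr : PySem.List.slice (p :: t) (some n) none = [] := by
              rw [PySem.List.slice_from _ (by omega)]
              apply List.drop_of_length_le
              simp at hle ⊢; omega
            simp only [List.length_cons, pvChunksWhile]
            rw [htake, hdr]
            have hnil : pvChunksWhile t.length n [] = [] := by cases t.length <;> rfl
            rw [hnil]
            simp only [List.nil_append, pvFin]
            rw [if_pos hle]
            simp
      · rw [not_le] at hle
        rw [pv_foldl_block n hn P b hle]
        have hdlen : (P.drop n.toNat).length ≤ N := by
          rw [List.length_drop]; omega
        rw [ih _ hdlen]
        have hdne : P.drop n.toNat ≠ [] := by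
          intro hnil
          have := congrArg List.length hnil
          simp [List.length_drop] at this
          omega
        have hPne : P ≠ [] := by intro h; subst h; simp at hle; omega
        obtain ⟨p, t, hpt⟩ := List.exists_cons_of_ne_nil hPne
        have hw : pvChunksWhile P.length n P
            = P.take n.toNat :: pvChunksWhile (P.drop n.toNat).length n (P.drop n.toNat) := by
          conv_lhs => rw [hpt, show (p :: t).length = t.length + 1 from by simp]
          simp only [pvChunksWhile]
          rw [← hpt,
            PySem.List.slice_to _ (by omega),
            PySem.List.slice_from _ (by omega)]
          congr 1
          apply pv_chunks_fuel n hn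
          · rw [hpt, List.length_drop]
            simp only [List.length_cons]
            omega
          · exact le_rfl
        have hdne' : pvChunksWhile (P.drop n.toNat).length n (P.drop n.toNat) ≠ [] := by
          obtain ⟨q, u, hqu⟩ := List.exists_cons_of_ne_nil hdne
          rw [hqu, show (q :: u).length = u.length + 1 from by simp]
          simp [pvChunksWhile]
        have hwne : pvChunksWhile P.length n P ≠ [] := by rw [hw]; simp
        rw [if_neg hwne, if_neg hdne', hw]
        simp

-- stepping a positive-step range once
theorem pv_pyRange_pos_cons (a b s : Int) (hs : 0 < s) (hab : a < b) :
    PySem.List.pyRange a b s = a :: PySem.List.pyRange (a + s) b s := by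
  rw [PySem.List.pyRange_of_pos _ _ hs, PySem.List.pyRange_of_pos _ _ hs]
  rw [if_pos hab]
  by_cases h2 : a + s < b
  · rw [if_pos h2]
    have key : (b - a + s - 1) / s = (b - (a + s) + s - 1) / s + 1 := by
      have : b - a + s - 1 = (b - (a + s) + s - 1) + 1 * s := by ring
      rw [this, Int.add_mul_ediv_right _ _ (by omega)]
    have hnn : 0 ≤ (b - (a + s) + s - 1) / s := Int.ediv_nonneg (by omega) (by omega)
    rw [key, show ((b - (a + s) + s - 1) / s + 1).toNat = ((b - (a + s) + s - 1) / s).toNat + 1 from by omega]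
    rw [List.range_succ_eq_map, List.map_cons, List.map_map]
    congr 1
    · push_cast; ring
    · apply List.map_congr_left
      intro k _
      simp only [Function.comp_apply, Nat.succ_eq_add_one]
      push_cast
      ring
  · rw [if_neg h2]
    have key : (b - a + s - 1) / s = 1 := by
      have hsplit : b - a + s - 1 = (b - a - 1) + 1 * s := by ring
      rw [hsplit, Int.add_mul_ediv_right _ _ (by omega),
        Int.ediv_eq_zero_of_lt (by omega) (by omega)]
      norm_num
    rw [key]
    simp

-- a positive-step range that starts at or past its stop is empty
theorem pv_pyRange_pos_nil (a b s : Int) (hs : 0 < s) (hab : b ≤ a) :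
    PySem.List.pyRange a b s = [] := by
  rw [PySem.List.pyRange_of_pos _ _ hs, if_neg (by omega)]
  simp

-- a negative-step range with start ≤ stop is empty
theorem pv_pyRange_neg_nil (a b s : Int) (hs : s < 0) (hab : a ≤ b) :
    PySem.List.pyRange a b s = [] := by
  simp only [PySem.List.pyRange]
  rw [if_neg (by omega)]
  simp only [if_neg (by omega : ¬ 0 < s), if_neg (by omega : ¬ b < a)]
  simp

-- B's slice-comprehension over range(0, len, n) is take/drop chunking (n ≥ 1)
theorem pv_map_chunks (n : Int) (hn : 1 ≤ n) :
    ∀ (N : Nat) (P : List (String × String)), P.length ≤ N →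
      (PySem.List.pyRange 0 (P.length : Int) n).map
          (fun k => PySem.List.slice P (some k) (some (k + n)))
        = pvChunksWhile P.length n P := by
  intro N
  induction N with
  | zero =>
      intro P hP
      have : P = [] := List.eq_nil_of_length_eq_zero (by omega)
      subst this
      simp only [List.length_nil, Nat.cast_zero]
      rw [pv_pyRange_pos_nil 0 0 n (by omega) le_rfl]
      rfl
  | succ N ih =>
      intro P hP
      cases hPc : P with
      | nil =>
          simp only [List.length_nil, Nat.cast_zero]
          rw [pv_pyRange_pos_nil 0 0 n (by omega) le_rfl]
          rfl
      | cons p t =>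
          rw [← hPc]
          have hL : 0 < (P.length : Int) := by
            rw [hPc]; exact_mod_cast Nat.succ_pos t.length
          rw [pv_pyRange_pos_cons 0 (P.length : Int) n (by omega) hL, List.map_cons]
          simp only [zero_add]
          have hhead : PySem.List.slice P (some 0) (some n) = PySem.List.slice P none (some n) := by
            rw [PySem.List.slice_zero_start]
          have hfold : pvChunksWhile P.length n P
              = PySem.List.slice P none (some n)
                :: pvChunksWhile t.length n (PySem.List.slice P (some n) none) := by
            conv_lhs => rw [hPc, show (p :: t).length = t.length + 1 from by simp]
            simp only [pvChunksWhile]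
            rw [← hPc]
          rw [hfold, hhead]
          congr 1
          set Q := PySem.List.slice P (some n) none with hQ
          have hQdrop : Q = P.drop n.toNat := by rw [hQ, PySem.List.slice_from _ (by omega)]
          have hQlen : Q.length = P.length - n.toNat := by rw [hQdrop, List.length_drop]
          have hQle : Q.length ≤ N := by
            rw [hQlen]
            have : P.length = t.length + 1 := by rw [hPc]; simp
            omega
          have htfuel : pvChunksWhile t.length n Q = pvChunksWhile Q.length n Q := by
            apply pv_chunks_fuel n hn
            · have : P.length = t.length + 1 := by rw [hPc]; simp
              rw [hQlen]; omega
            · exact le_rfl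
          rw [htfuel, ← ih Q hQle]
          -- the shifted range enumerates chunks of the dropped list
          by_cases hnL : n < (P.length : Int)
          · rw [PySem.List.pyRange_of_pos _ _ (show (0:Int) < n by omega),
              PySem.List.pyRange_of_pos _ _ (show (0:Int) < n by omega)]
            simp only [zero_add]
            rw [if_pos hnL, if_pos (show (0:Int) < (Q.length : Int) by rw [hQlen]; omega)]
            have hcount : (((P.length : Int)) - n + n - 1) / n = (((Q.length : Int)) - 0 + n - 1) / n := by
              rw [hQlen]
              congr 1
              omega
            rw [hcount, List.map_map, List.map_map]
            apply List.map_congr_left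
            intro k _
            simp only [Function.comp_apply]
            set m := n * (k : Int) with hm
            have hm0 : 0 ≤ m := by rw [hm]; positivity
            rw [PySem.List.slice_toNat _ (by omega) (by omega),
              PySem.List.slice_toNat _ (by omega) (by omega)]
            rw [hQdrop, List.drop_drop]
            congr 1
            · omega
            · congr 1
              omega
          · rw [pv_pyRange_pos_nil n (P.length : Int) n (by omega) (by omega),
              pv_pyRange_pos_nil 0 (Q.length : Int) n (by omega) (by rw [hQlen]; omega)]
            simp

-- the two programs enumerate the same flat pair list
theorem pv_pairs_eq (s : List String) (autocorr only_autocorr : Bool) :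
    ((PySem.List.pyRange 0 (s.length : Int) 1).flatMap (fun i =>
      (((PySem.List.pyRange (i + (if autocorr then 0 else 1)) (s.length : Int) 1).filter
          (fun j => !(only_autocorr && !(i == j)))).map
        (fun j => (PySem.List.pyGetD s i "", PySem.List.pyGetD s j ""))))) =
    (if only_autocorr then
      (if autocorr then s.map (fun x => (x, x)) else [])
    else
      (PySem.List.pyRange 0 (s.length : Int) 1).flatMap (fun i =>
        (PySem.List.slice s (some (i + (if autocorr then 0 else 1))) none).map
          (fun y => (PySem.List.pyGetD s i "", y)))) := by
  cases only_autocorr with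
  | false =>
      simp only [Bool.false_and, Bool.not_false, List.filter_true, Bool.false_eq_true, if_false]
      apply List.flatMap_congr
      intro i hi
      have hi' : 0 ≤ i := (PySem.List.mem_pyRange_one.mp hi).1
      have hd : 0 ≤ i + (if autocorr then 0 else 1) := by split <;> omega
      rw [PySem.List.slice_from _ hd,
        ← PySem.List.map_pyGetD_pyRange' s "" hd,
        List.map_map]
      rfl
  | true =>
      cases autocorr with
      | true =>
          simp only [if_true]
          conv_rhs => rw [← PySem.List.map_pyGetD_pyRange_zero' s "", List.map_map,
            List.map_eq_flatMap]
          apply List.flatMap_congr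
          intro i hi
          have hi' := PySem.List.mem_pyRange_one.mp hi
          have hcons : PySem.List.pyRange (i + (0:Int)) (s.length : Int) 1
              = i :: PySem.List.pyRange (i + 1) (s.length : Int) 1 := by
            rw [show i + (0:Int) = i from by ring]
            exact PySem.List.pyRange_one_cons (by omega)
          rw [hcons, List.filter_cons]
          simp only [Bool.true_and, Bool.not_not, beq_self_eq_true, if_true]
          have hrest : (PySem.List.pyRange (i + 1) (s.length : Int) 1).filter
              (fun j => i == j) = [] := by
            apply List.filter_eq_nil_iff.mpr
            intro j hj
            have := (PySem.List.mem_pyRange_one.mp hj).1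
            simp
            omega
          rw [hrest]
          rfl
      | false =>
          simp only [if_true, Bool.false_eq_true, if_false]
          apply List.flatMap_eq_nil_iff.mpr
          intro i hi
          apply List.map_eq_nil_iff.mpr
          apply List.filter_eq_nil_iff.mpr
          intro j hj
          have := (PySem.List.mem_pyRange_one.mp hj).1
          simp
          omega

-- ===== VERDICT (by name: the statement is the Claim_ definition above) =====
theorem station_pairs_spec : Claim_equal_station_pairs := by
  intro staids n autocorr only_autocorr _ hpre
  unfold Spec_station_pairs station_pairs station_pairs_alt
  set s := PySem.List.sorted staids (fun x => x) false with hs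
  have hA : (PySem.List.pyRange 0 (s.length : Int) 1).foldl (fun st i =>
      (PySem.List.pyRange (i + (if autocorr then 0 else 1)) (s.length : Int) 1).foldl
        (fun (st : List (List (String × String)) × List (String × String)) j =>
          if only_autocorr && !(i == j) then st
          else
            let st := if ((st.2.length : Int) == n) then (st.1 ++ [st.2], ([] : List (String × String))) else st
            (st.1, st.2 ++ [(PySem.List.pyGetD s i "", PySem.List.pyGetD s j "")])) st)
      (([] : List (List (String × String))), ([] : List (String × String)))
      = ((PySem.List.pyRange 0 (s.length : Int) 1).flatMap (fun i =>
          (((PySem.List.pyRange (i + (if autocorr then 0 else 1)) (s.length : Int) 1).filter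
              (fun j => !(only_autocorr && !(i == j)))).map
            (fun j => (PySem.List.pyGetD s i "", PySem.List.pyGetD s j ""))))).foldl
          (pvStep n) ([], []) := by
    rw [pv_foldl_flatMap]
    apply PySem.List.foldl_congr_mem
    intro st i _
    rw [pv_foldl_skip]
  show pvFin n _ = _
  rw [hA, pv_pairs_eq s autocorr only_autocorr]
  set P := (if only_autocorr then
      (if autocorr then s.map (fun x => (x, x)) else [])
    else
      (PySem.List.pyRange 0 (s.length : Int) 1).flatMap (fun i =>
        (PySem.List.slice s (some (i + (if autocorr then 0 else 1))) none).map
          (fun y => (PySem.List.pyGetD s i "", y)))) with hP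
  obtain ⟨hn0, hrest⟩ := hpre
  by_cases hneg : n < 0
  · rw [pv_foldl_noflush n P [] [] (by intro k _ _; omega)]
    simp only [pvFin, List.nil_append]
    rw [if_neg (by simp; omega),
      pv_pyRange_neg_nil 0 (P.length : Int) n hneg (by positivity)]
    simp
  · have hn1 : 1 ≤ n := by omega
    have hshape : (if only_autocorr then autocorr = true ∧ staids ≠ []
        else if autocorr then staids ≠ [] else 2 ≤ staids.length) := by
      rcases hrest with h | h
      · omega
      · exact h
    have hslen : s.length = staids.length := by
      rw [hs, PySem.List.length_sorted]
    have hne : P ≠ [] := by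
      rw [hP]
      cases ho : only_autocorr with
      | true =>
          rw [ho] at hshape
          simp only [if_true]
          obtain ⟨ha, hst⟩ := hshape
          rw [ha]
          simp only [if_true]
          intro h
          have := congrArg List.length h
          simp [hslen] at this
          exact hst this
      | false =>
          rw [ho] at hshape
          simp only [Bool.false_eq_true, if_false]
          intro h
          rw [List.flatMap_eq_nil_iff] at h
          have hlenpos : 0 < staids.length := by
            cases ha : autocorr with
            | true =>
                rw [ha] at hshape
                simp only [if_true] at hshape
                exact List.length_pos_of_ne_nil hshape
            | false =>
                rw [ha] at hshape
                simp only [Bool.false_eq_true, if_false] at hshape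
                omega
          have h0mem : (0 : Int) ∈ PySem.List.pyRange 0 (s.length : Int) 1 := by
            rw [PySem.List.mem_pyRange_one]
            refine ⟨le_refl 0, ?_⟩
            rw [hslen]
            exact_mod_cast hlenpos
          have := h 0 h0mem
          rw [List.map_eq_nil_iff] at this
          cases ha : autocorr with
          | true =>
              rw [ha] at this
              rw [show (0 : Int) + (if true = true then (0:Int) else 1) = 0 from by simp] at this
              rw [PySem.List.slice_zero_start, PySem.List.slice_none_none] at this
              rw [ha] at hshape
              simp only [if_true] at hshape
              exact hshape (by
                apply List.eq_nil_of_length_eq_zero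
                have := congrArg List.length this
                simp [hslen] at this ⊢
                omega)
          | false =>
              rw [ha] at this hshape
              rw [show (0 : Int) + (if false = true then (0:Int) else 1) = 1 from by simp] at this
              rw [PySem.List.slice_from _ (by omega)] at this
              have := congrArg List.length this
              simp [hslen] at this
              simp only [Bool.false_eq_true, if_false] at hshape
              omega
    have hmain := pv_chunk_main n hn1 P []
    rw [List.nil_append] at hmain
    have hwne : pvChunksWhile P.length n P ≠ [] := by
      obtain ⟨p, t, hpt⟩ := List.exists_cons_of_ne_nil hne
      rw [hpt, show (p :: t).length = t.length + 1 from by simp]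
      simp [pvChunksWhile]
    rw [hmain, if_neg hwne, ← pv_map_chunks n hn1 P.length P le_rfl]
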